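-- pv_equiv track=rewrite | github.com/VeregaS/EGE2024 | 23/7225.py | f
-- ===== SOURCE A (Python) =====
-- def f(start, end, last_h):
--     if start == end:
--         return 1
--     if  start > end:
--         return 0
--     if start < end:
--         if last_h != 'A':
--             return f(start + 3, end, 'A') + f(start * 5, end, 'B') + f(start * 7, end, 'C')
--         if last_h == 'A':
--             return f(start + 3, end, 'A') + f(start * 7, end, 'C')
-- ===== SOURCE B (Python) =====
-- def f(start, end, last_h):
--     # Bottom-up DP over the reachable values (O(end-start) instead of exponential recursion).
--     if start >= end:
--         return 1 if start == end else 0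
--     a = {end: 1}   # ways when the previous move was '+3' (rule A: '*5' forbidden next)
--     b = {end: 1}   # ways when any move is allowed next
--     for n in range(end - 1, start - 1, -1):
--         t = a.get(n + 3, 0)
--         a[n] = t + b.get(7 * n, 0)
--         b[n] = t + b.get(5 * n, 0) + b.get(7 * n, 0)
--     return a[start] if last_h == 'A' else b[start]
-- ===== Notes on version B (the rewrite author's own statement) =====
-- stated objective: faster
-- what changed: Replaced A's exponential three-way recursion by a bottom-up dynamic program that fills two dictionaries (last-move-was-'+3' vs unrestricted) for each value from end down to start, so each state is computed once.
import Mathlib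
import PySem

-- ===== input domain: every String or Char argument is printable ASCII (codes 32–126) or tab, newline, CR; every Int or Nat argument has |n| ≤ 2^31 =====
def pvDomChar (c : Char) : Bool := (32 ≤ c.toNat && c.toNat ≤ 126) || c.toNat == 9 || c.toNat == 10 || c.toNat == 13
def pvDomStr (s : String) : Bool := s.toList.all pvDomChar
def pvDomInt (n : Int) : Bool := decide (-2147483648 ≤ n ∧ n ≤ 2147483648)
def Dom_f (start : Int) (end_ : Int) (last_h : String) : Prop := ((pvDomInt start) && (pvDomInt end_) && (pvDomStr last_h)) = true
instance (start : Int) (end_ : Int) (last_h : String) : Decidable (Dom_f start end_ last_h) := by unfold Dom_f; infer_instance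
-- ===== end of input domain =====

-- B replaces A's exponential three-way recursion by a bottom-up DP (two dictionaries,
-- one pass from end down to start): objective faster, asymptotic speed-up.

-- ===== PORT A =====
-- A's recursion diverges (Python: RecursionError) when start < end and start ≤ 0;
-- the fuel only makes the Lean function total and is sufficient on all Pre_ inputs
-- (each recursive call strictly increases start when 1 ≤ start).
def fAux : Nat → Int → Int → String → Int
  | 0, _, _, _ => 0
  | fuel + 1, start, end_, last_h =>
    if start = end_ then 1
    else if start > end_ then 0
    else
      if last_h ≠ "A" then
        fAux fuel (start + 3) end_ "A" + fAux fuel (start * 5) end_ "B" + fAux fuel (start * 7) end_ "C"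
      else
        fAux fuel (start + 3) end_ "A" + fAux fuel (start * 7) end_ "C"

def f (start : Int) (end_ : Int) (last_h : String) : Int :=
  fAux ((end_ - start).toNat + 1) start end_ last_h

-- ===== PORT B =====
-- one loop iteration of Source B: t = a.get(n+3,0); a[n] = t + b.get(7n,0); b[n] = t + b.get(5n,0) + b.get(7n,0)
def fStep (ab : PySem.Dict Int Int × PySem.Dict Int Int) (n : Int) :
    PySem.Dict Int Int × PySem.Dict Int Int :=
  let t := ab.1.getD (n + 3) 0
  (ab.1.insert n (t + ab.2.getD (7 * n) 0),
   ab.2.insert n (t + ab.2.getD (5 * n) 0 + ab.2.getD (7 * n) 0))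

def f_alt (start : Int) (end_ : Int) (last_h : String) : Int :=
  if start ≥ end_ then (if start = end_ then 1 else 0)
  else
    let a0 : PySem.Dict Int Int := PySem.Dict.empty.insert end_ 1
    let b0 : PySem.Dict Int Int := PySem.Dict.empty.insert end_ 1
    let ab := (PySem.List.pyRange (end_ - 1) (start - 1) (-1)).foldl fStep (a0, b0)
    -- a[start] / b[start]: the key start is always inserted by the loop (start < end_),
    -- so getD's default is never used on Pre_ inputs
    if last_h = "A" then ab.1.getD start 0 else ab.2.getD start 0

-- ===== PRECONDITION & SPEC =====
-- Pre_ excludes exactly the inputs where Python A raises RecursionError: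
-- start < end with start ≤ 0 (the start*5 / start*7 calls never pass end).
def Pre_f (start : Int) (end_ : Int) (_last_h : String) : Prop :=
  1 ≤ start ∨ end_ ≤ start
instance (start : Int) (end_ : Int) (last_h : String) : Decidable (Pre_f start end_ last_h) := by
  unfold Pre_f; infer_instance

def pvWitness_f : Int × Int × String := (1, 10, "A")

def Spec_f (start : Int) (end_ : Int) (last_h : String) (out : Int) : Prop := out = f_alt start end_ last_h
instance (start : Int) (end_ : Int) (last_h : String) (out : Int) : Decidable (Spec_f start end_ last_h out) := by unfold Spec_f; infer_instance

-- ===== CLAIM (what is proved, stated in full; the proofs are below) =====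
def Claim_equal_f : Prop := ∀ (start : Int) (end_ : Int) (last_h : String), Dom_f start end_ last_h → Pre_f start end_ last_h → Spec_f start end_ last_h (f start end_ last_h)

-- ===== LEMMAS AND PROOFS =====

-- the ideal count: g end_ isA n = number of ways from n (isA = the last move was '+3')
def g (end_ : Int) (isA : Bool) (n : Int) : Int :=
  if _h1 : n = end_ then 1
  else if _h2 : n > end_ then 0
  else if _h3 : 1 ≤ n then
    if isA then g end_ true (n + 3) + g end_ false (n * 7)
    else g end_ true (n + 3) + g end_ false (n * 5) + g end_ false (n * 7)
  else 0
termination_by (end_ - n).toNat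
decreasing_by all_goals omega

lemma fAux_eq_g (end_ : Int) :
    ∀ (fuel : Nat) (n : Int) (lh : String), 1 ≤ n → (end_ - n).toNat < fuel →
      fAux fuel n end_ lh = g end_ (lh == "A") n := by
  intro fuel
  induction fuel with
  | zero => intro n lh _ h; omega
  | succ k ih =>
    intro n lh hn hf
    by_cases h1 : n = end_
    · simp [fAux, h1, g]
    · by_cases h2 : n > end_
      · rw [g]
        simp [fAux, h1, h2]
      · have hlt : n < end_ := by omega
        have r3 : fAux k (n + 3) end_ "A" = g end_ true (n + 3) := by
          have := ih (n + 3) "A" (by omega) (by omega)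
          simpa using this
        have r5 : fAux k (n * 5) end_ "B" = g end_ false (n * 5) := by
          have := ih (n * 5) "B" (by omega) (by omega)
          simpa using this
        have r7 : fAux k (n * 7) end_ "C" = g end_ false (n * 7) := by
          have := ih (n * 7) "C" (by omega) (by omega)
          simpa using this
        by_cases hA : lh = "A"
        · rw [g]
          simp [fAux, h1, h2, hA, hn, r3, r7]
        · rw [g]
          simp [fAux, h1, h2, hA, hn, r3, r5, r7]

-- invariant of B's loop: after the loop has filled all values ≥ m, both dicts agree with g
def LoopInv (end_ m : Int) (ab : PySem.Dict Int Int × PySem.Dict Int Int) : Prop :=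
  ∀ k : Int, m ≤ k → ab.1.getD k 0 = g end_ true k ∧ ab.2.getD k 0 = g end_ false k

lemma inv_init (end_ : Int) :
    LoopInv end_ end_ (PySem.Dict.empty.insert end_ 1, PySem.Dict.empty.insert end_ 1) := by
  intro k hk
  by_cases h : k = end_
  · subst h
    constructor <;> · rw [g]; simp [PySem.Dict.getD_insert_self]
  · have hk' : k > end_ := by omega
    constructor <;>
      · rw [g]
        simp [PySem.Dict.getD_insert, h, hk', PySem.Dict.getD_empty]

lemma g_true_eq (end_ n : Int) (h1 : ¬ n = end_) (h2 : ¬ n > end_) (h3 : 1 ≤ n) :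
    g end_ true n = g end_ true (n + 3) + g end_ false (n * 7) := by
  rw [g]; simp [h1, h2, h3]

lemma g_false_eq (end_ n : Int) (h1 : ¬ n = end_) (h2 : ¬ n > end_) (h3 : 1 ≤ n) :
    g end_ false n = g end_ true (n + 3) + g end_ false (n * 5) + g end_ false (n * 7) := by
  rw [g]; simp [h1, h2, h3]

lemma inv_step (end_ n : Int) (ab : PySem.Dict Int Int × PySem.Dict Int Int)
    (hn : 1 ≤ n) (hlt : n < end_) (hinv : LoopInv end_ (n + 1) ab) :
    LoopInv end_ n (fStep ab n) := by
  intro k hk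
  by_cases hkn : k = n
  · subst hkn
    have h3 := hinv (k + 3) (by omega)
    have h5 := hinv (5 * k) (by omega)
    have h7 := hinv (7 * k) (by omega)
    constructor
    · show (ab.1.insert k _).getD k 0 = _
      rw [PySem.Dict.getD_insert_self, h3.1, h7.2,
        g_true_eq end_ k (by omega) (by omega) hn, mul_comm k 7]
    · show (ab.2.insert k _).getD k 0 = _
      rw [PySem.Dict.getD_insert_self, h3.1, h5.2, h7.2,
        g_false_eq end_ k (by omega) (by omega) hn, mul_comm k 5, mul_comm k 7]
  · have hk' : n + 1 ≤ k := by omega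
    have := hinv k hk'
    constructor
    · show (ab.1.insert n _).getD k 0 = _
      rw [PySem.Dict.getD_insert]
      simp [hkn, this.1]
    · show (ab.2.insert n _).getD k 0 = _
      rw [PySem.Dict.getD_insert]
      simp [hkn, this.2]

lemma inv_fold (end_ lo : Int) (hlo : 1 ≤ lo) :
    ∀ (c : Nat) (hi : Int) (ab : PySem.Dict Int Int × PySem.Dict Int Int),
      (hi - lo + 1).toNat = c → hi < end_ → lo ≤ hi + 1 → LoopInv end_ (hi + 1) ab →
      LoopInv end_ lo ((PySem.List.pyRange hi (lo - 1) (-1)).foldl fStep ab) := by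
  intro c
  induction c with
  | zero =>
    intro hi ab hc hhi hle hinv
    have hnil : hi ≤ lo - 1 := by omega
    rw [PySem.List.pyRange_neg_one_eq_nil hnil]
    have : lo = hi + 1 := by omega
    simpa [this, List.foldl] using hinv
  | succ k ih =>
    intro hi ab hc hhi hle hinv
    have hcons : lo - 1 < hi := by omega
    rw [PySem.List.pyRange_neg_one_cons hcons, List.foldl_cons]
    exact ih (hi - 1) (fStep ab hi) (by omega) (by omega) (by omega)
      (by
        have := inv_step end_ hi ab (by omega) hhi hinv
        simpa [(by omega : hi - 1 + 1 = hi)] using this)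

-- ===== VERDICT (by name: the statement is the Claim_ definition above) =====
theorem f_spec : Claim_equal_f := by
  intro start end_ last_h _hdom hpre
  unfold Spec_f f f_alt
  by_cases hge : start ≥ end_
  · by_cases heq : start = end_
    · simp [fAux, heq]
    · have hgt : start > end_ := by omega
      simp [fAux, heq, hgt, hge]
  · have hlt : start < end_ := by omega
    have hstart : 1 ≤ start := by
      rcases hpre with h | h
      · exact h
      · omega
    have hA : fAux ((end_ - start).toNat + 1) start end_ last_h = g end_ (last_h == "A") start :=
      fAux_eq_g end_ _ start last_h hstart (by omega)
    have hLoopInv : LoopInv end_ start ((PySem.List.pyRange (end_ - 1) (start - 1) (-1)).foldl fStep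
        (PySem.Dict.empty.insert end_ 1, PySem.Dict.empty.insert end_ 1)) := by
      apply inv_fold end_ start hstart ((end_ - 1 - start + 1).toNat) (end_ - 1) _ rfl (by omega) (by omega)
      have := inv_init end_
      simpa [(by omega : end_ - 1 + 1 = end_)] using this
    have hBoth := hLoopInv start le_rfl
    by_cases hAstr : last_h = "A"
    · subst hAstr
      simpa [hge, hBoth.1] using hA
    · have hne : (last_h == "A") = false := by simpa using hAstr
      rw [hne] at hA
      simpa [hge, hAstr, hBoth.2] using hA
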